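-- pv_equiv track=rewrite | github.com/huangqiank/Algorithm | string2/remove_adjacent2.py | remove_adjacent2
-- ===== SOURCE A (Python) =====
-- def remove_adjacent2(a):
--     if not a or len(a) <2:
--         return a
--     n = len(a)
--     i = 0
--     res=[]
--     while i<n:
--         if len(res)<2 or res[-1] != a[i] or res[-2] != a[i]:
--             res.append(a[i])
--             i+=1
--         else:
--             i+=1
--     return ''.join(res)
-- ===== SOURCE B (Python) =====
-- def remove_adjacent2(a):
--     if not a or len(a) < 2:
--         return a
--     parts = []
--     i, n = 0, len(a)
--     while i < n:
--         j = i
--         while j < n and a[j] == a[i]: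
--             j += 1
--         parts.append(a[i] * min(j - i, 2))
--         i = j
--     return ''.join(parts)
-- ===== Notes on version B (the rewrite author's own statement) =====
-- stated objective: alternative
-- what changed: B scans the string run by run (inner pointer finds the end of each run of equal chars, then emits min(runlen,2) copies), instead of A's char-by-char loop that consults the last two characters of the output buffer.
import Mathlib
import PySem

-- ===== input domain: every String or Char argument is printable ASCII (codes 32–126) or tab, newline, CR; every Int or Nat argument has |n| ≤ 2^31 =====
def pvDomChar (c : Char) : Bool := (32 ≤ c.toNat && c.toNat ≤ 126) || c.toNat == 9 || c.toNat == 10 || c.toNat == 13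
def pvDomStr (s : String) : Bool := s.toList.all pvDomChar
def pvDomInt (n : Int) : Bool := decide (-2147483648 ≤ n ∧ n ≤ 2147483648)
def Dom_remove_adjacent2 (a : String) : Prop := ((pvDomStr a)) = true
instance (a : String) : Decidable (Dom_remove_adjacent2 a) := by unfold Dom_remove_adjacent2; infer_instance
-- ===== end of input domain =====

-- B replaces A's char-by-char loop (which inspects res[-1]/res[-2]) by a run-by-run scan
-- emitting min(runlen, 2) copies of each run's char; objective: alternative decomposition, same cost.

-- ===== PORT A =====
-- the while-loop of A: res is the output buffer (appended at the back, as in Python)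
def pvLoopA (res : List Char) : List Char → List Char
  | [] => res
  | c :: rest =>
    if res.length < 2 ∨ PySem.List.pyGet? res (-1) ≠ some c ∨ PySem.List.pyGet? res (-2) ≠ some c then
      pvLoopA (res ++ [c]) rest
    else
      pvLoopA res rest

def remove_adjacent2 (a : String) : String :=
  let l := a.toList
  if l.length < 2 then a
  else String.ofList (pvLoopA [] l)

-- ===== PORT B =====
-- the inner while of B: length of the run of char c at the front, and the remainder
def pvTakeRun (c : Char) : List Char → Nat × List Char
  | [] => (0, [])
  | d :: rest =>
    if d = c then
      let p := pvTakeRun c rest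
      (p.1 + 1, p.2)
    else (0, d :: rest)

-- termination helper for the outer loop (cited by pvRuns's decreasing_by)
theorem pvTakeRun_len (c : Char) : ∀ l : List Char, (pvTakeRun c l).2.length ≤ l.length := by
  intro l
  induction l with
  | nil => simp [pvTakeRun]
  | cons d rest ih =>
    by_cases h : d = c <;> simp [pvTakeRun, h]
    omega

-- the outer while of B: one (char, runlength) pair per run
def pvRuns : List Char → List (Char × Nat)
  | [] => []
  | c :: rest => (c, (pvTakeRun c rest).1 + 1) :: pvRuns (pvTakeRun c rest).2
termination_by l => l.length
decreasing_by
  have := pvTakeRun_len c rest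
  simp
  omega

def remove_adjacent2_alt (a : String) : String :=
  let l := a.toList
  if l.length < 2 then a
  else String.ofList (((pvRuns l).map (fun p => List.replicate (min p.2 2) p.1)).flatten)

-- ===== PRECONDITION & SPEC =====
def Spec_remove_adjacent2 (a : String) (out : String) : Prop := out = remove_adjacent2_alt a
instance (a : String) (out : String) : Decidable (Spec_remove_adjacent2 a out) := by unfold Spec_remove_adjacent2; infer_instance

-- ===== CLAIM (what is proved, stated in full; the proofs are below) =====
def Claim_equal_remove_adjacent2 : Prop := ∀ (a : String), Dom_remove_adjacent2 a → Spec_remove_adjacent2 a (remove_adjacent2 a)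

-- ===== LEMMAS AND PROOFS =====

-- proof-side model of A's loop: state r is the REVERSE of the output buffer res
def pvRun2 (r : List Char) : List Char → List Char
  | [] => []
  | c :: rest =>
    match r with
    | x :: y :: _ => if x = c ∧ y = c then pvRun2 r rest else c :: pvRun2 (c :: r) rest
    | _ => c :: pvRun2 (c :: r) rest

-- B's output as a function of the char list
def pvOutB (l : List Char) : List Char :=
  ((pvRuns l).map (fun p => List.replicate (min p.2 2) p.1)).flatten

-- A's append-guard, read off the reversed buffer
theorem pvCond_iff (r : List Char) (c : Char) :
    (r.reverse.length < 2 ∨ PySem.List.pyGet? r.reverse (-1) ≠ some c ∨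
      PySem.List.pyGet? r.reverse (-2) ≠ some c) ↔
    (match r with | x :: y :: _ => ¬(x = c ∧ y = c) | _ => True) := by
  rcases r with _ | ⟨x, _ | ⟨y, t⟩⟩
  · simp
  · simp
  · have h1 : PySem.List.pyGet? (x :: y :: t).reverse (-1) = some x := by
      rw [PySem.List.pyGet?_neg_one]
      simp
    have h2 : PySem.List.pyGet? (x :: y :: t).reverse (-2) = some y := by
      rw [PySem.List.pyGet?_neg_ofNat _ 2 (by omega) (by simp)]
      simp
    simp only [h1, h2, List.length_reverse, List.length_cons]
    constructor
    · rintro (h | h | h) ⟨hx, hy⟩ <;> simp_all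
    · intro h
      by_cases hx : x = c
      · by_cases hy : y = c
        · exact absurd ⟨hx, hy⟩ h
        · right; right; simp [hy]
      · right; left; simp [hx]

-- bridge: A's loop equals the reversed-state model
theorem pvLoopA_eq_run2 : ∀ (l r : List Char), pvLoopA r.reverse l = r.reverse ++ pvRun2 r l := by
  intro l
  induction l with
  | nil => intro r; simp [pvLoopA, pvRun2]
  | cons c rest ih =>
    intro r
    rcases r with _ | ⟨x, _ | ⟨y, t⟩⟩
    · have hcond : (([] : List Char).reverse.length < 2 ∨ PySem.List.pyGet? ([] : List Char).reverse (-1) ≠ some c ∨ PySem.List.pyGet? ([] : List Char).reverse (-2) ≠ some c) := by simp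
      simp only [pvLoopA, pvRun2, if_pos hcond]
      simpa using ih [c]
    · have hcond : (([x] : List Char).reverse.length < 2 ∨ PySem.List.pyGet? ([x] : List Char).reverse (-1) ≠ some c ∨ PySem.List.pyGet? ([x] : List Char).reverse (-2) ≠ some c) := by simp
      simp only [pvLoopA, pvRun2, if_pos hcond]
      simpa using ih [c, x]
    · by_cases hxy : x = c ∧ y = c
      · have hcond : ¬ ((x :: y :: t).reverse.length < 2 ∨ PySem.List.pyGet? (x :: y :: t).reverse (-1) ≠ some c ∨ PySem.List.pyGet? (x :: y :: t).reverse (-2) ≠ some c) := by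
          rw [pvCond_iff]
          simpa using hxy
        simp only [pvLoopA, pvRun2, if_neg hcond, if_pos hxy]
        exact ih (x :: y :: t)
      · have hcond : ((x :: y :: t).reverse.length < 2 ∨ PySem.List.pyGet? (x :: y :: t).reverse (-1) ≠ some c ∨ PySem.List.pyGet? (x :: y :: t).reverse (-2) ≠ some c) := by
          rw [pvCond_iff]
          exact hxy
        simp only [pvLoopA, pvRun2, if_pos hcond, if_neg hxy]
        have := ih (c :: x :: y :: t)
        simp only [List.reverse_cons] at this ⊢
        rw [List.append_assoc] at this
        simpa using this

-- decomposition of the input at pvTakeRun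
theorem pvTakeRun_spec (c : Char) : ∀ l : List Char,
    l = List.replicate (pvTakeRun c l).1 c ++ (pvTakeRun c l).2 ∧
    (pvTakeRun c l).2.head? ≠ some c := by
  intro l
  induction l with
  | nil => simp [pvTakeRun]
  | cons d rest ih =>
    by_cases h : d = c
    · subst h
      refine ⟨?_, ?_⟩
      · conv_lhs => rw [ih.1]
        simp [pvTakeRun, List.replicate_succ]
      · simpa [pvTakeRun] using ih.2
    · simp [pvTakeRun, h]

-- within a run already represented twice at the head of the state, chars are skipped
theorem pvRun2_skip (c : Char) (r post : List Char) :
    ∀ k, pvRun2 (c :: c :: r) (List.replicate k c ++ post) = pvRun2 (c :: c :: r) post := by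
  intro k
  induction k with
  | zero => simp
  | succ k ih => simpa [List.replicate_succ, pvRun2] using ih

-- main: the model computes B's run-based output whenever the state head differs from the next char
-- emitting a char whose state head differs
theorem pvRun2_emit (r : List Char) (c : Char) (rest : List Char) (h : r.head? ≠ some c) :
    pvRun2 r (c :: rest) = c :: pvRun2 (c :: r) rest := by
  rcases r with _ | ⟨x, _ | ⟨y, t⟩⟩
  · simp [pvRun2]
  · simp [pvRun2]
  · have hx : x ≠ c := by simpa using h
    simp [pvRun2, hx]

-- second copy of a run's char is still emitted
theorem pvRun2_emit2 (r : List Char) (c : Char) (rest : List Char) (h : r.head? ≠ some c) :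
    pvRun2 (c :: r) (c :: rest) = c :: pvRun2 (c :: c :: r) rest := by
  rcases r with _ | ⟨x, t⟩
  · simp [pvRun2]
  · have hx : x ≠ c := by simpa using h
    simp [pvRun2, hx]

theorem pvRun2_eq_outB : ∀ (n : Nat) (l r : List Char), l.length ≤ n →
    r.head? ≠ l.head? ∨ l = [] → pvRun2 r l = pvOutB l := by
  intro n
  induction n with
  | zero =>
    intro l r hl _
    have hln : l = [] := by cases l <;> simp_all
    subst hln
    simp [pvRun2, pvOutB, pvRuns]
  | succ n ih =>
    intro l r hl hr
    rcases l with _ | ⟨c, rest⟩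
    · simp [pvRun2, pvOutB, pvRuns]
    · have hhead : r.head? ≠ some c := by
        rcases hr with h | h
        · simpa using h
        · cases h
      obtain ⟨hdec, hpost⟩ := pvTakeRun_spec c rest
      have houtB : pvOutB (c :: rest) =
          List.replicate (min ((pvTakeRun c rest).1 + 1) 2) c ++ pvOutB (pvTakeRun c rest).2 := by
        simp [pvOutB, pvRuns]
      set k0 := (pvTakeRun c rest).1 with hk0
      set q := (pvTakeRun c rest).2 with hq
      simp only [List.length_cons] at hl
      rcases k0 with _ | k
      · -- run of length 1
        simp only [List.replicate_zero, List.nil_append] at hdec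
        rw [houtB, pvRun2_emit r c rest hhead, hdec]
        have hqlen : q.length ≤ n := by rw [← hdec]; omega
        rw [ih q (c :: r) hqlen (by
          left
          simp only [List.head?_cons]
          intro hcontra
          exact hpost hcontra.symm)]
        simp
      · -- run of length ≥ 2
        have hrest : rest = c :: (List.replicate k c ++ q) := by
          rw [hdec]; simp [List.replicate_succ]
        have hqlen : q.length ≤ n := by
          have := congrArg List.length hrest
          simp at this
          omega
        rw [houtB, pvRun2_emit r c rest hhead, hrest,
            pvRun2_emit2 r c _ hhead, pvRun2_skip c r q k,
            ih q (c :: c :: r) hqlen (by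
              left
              simp only [List.head?_cons]
              intro hcontra
              exact hpost hcontra.symm)]
        simp [List.replicate]

-- ===== VERDICT (by name: the statement is the Claim_ definition above) =====
theorem remove_adjacent2_spec : Claim_equal_remove_adjacent2 := by
  intro a _
  unfold Spec_remove_adjacent2 remove_adjacent2 remove_adjacent2_alt
  simp only
  by_cases h : a.toList.length < 2
  · rw [if_pos h, if_pos h]
  · rw [if_neg h, if_neg h]
    have h1 := pvLoopA_eq_run2 a.toList []
    have h2 := pvRun2_eq_outB a.toList.length a.toList [] le_rfl
    simp only [List.reverse_nil, List.nil_append] at h1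
    rw [h1, h2]
    · rfl
    · rcases a.toList with _ | ⟨c, t⟩
      · right; rfl
      · left; simp
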